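-- pv_equiv track=rewrite | github.com/GaneshAdapa202/GenAI | streamlit/app.py | prepare_context_and_quotes
-- ===== SOURCE A (Python) =====
-- def prepare_context_and_quotes(ranked, query, top_k_context: int = 1, max_chars: int = 4000):
--     selected = ranked[:top_k_context]
--     ctx = ""
--     for r in selected:
--         block = f"Source: {r['source']}\n{r['text']}\n\n"
--         if len(ctx) + len(block) > max_chars:
--             break
--         ctx += block
--     return ctx.strip(), selected
-- ===== SOURCE B (Python) =====
-- def prepare_context_and_quotes(ranked, query, top_k_context: int = 1, max_chars: int = 4000):
--     selected = ranked[:top_k_context]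
--     blocks = [f"Source: {r['source']}\n{r['text']}\n\n" for r in selected]
--     sums = []
--     total = 0
--     for b in blocks:
--         total += len(b)
--         sums.append(total)
--     i = next((j for j, s in enumerate(sums) if s > max_chars), len(blocks))
--     return "".join(blocks[:i]).strip(), selected
-- ===== Notes on version B (the rewrite author's own statement) =====
-- stated objective: alternative
-- what changed: Replaces A's accumulate-and-break string loop by a three-stage pipeline: map selected items to formatted blocks, compute prefix sums of block lengths, find the first index whose cumulative length exceeds max_chars, and join that prefix.
import Mathlib
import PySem

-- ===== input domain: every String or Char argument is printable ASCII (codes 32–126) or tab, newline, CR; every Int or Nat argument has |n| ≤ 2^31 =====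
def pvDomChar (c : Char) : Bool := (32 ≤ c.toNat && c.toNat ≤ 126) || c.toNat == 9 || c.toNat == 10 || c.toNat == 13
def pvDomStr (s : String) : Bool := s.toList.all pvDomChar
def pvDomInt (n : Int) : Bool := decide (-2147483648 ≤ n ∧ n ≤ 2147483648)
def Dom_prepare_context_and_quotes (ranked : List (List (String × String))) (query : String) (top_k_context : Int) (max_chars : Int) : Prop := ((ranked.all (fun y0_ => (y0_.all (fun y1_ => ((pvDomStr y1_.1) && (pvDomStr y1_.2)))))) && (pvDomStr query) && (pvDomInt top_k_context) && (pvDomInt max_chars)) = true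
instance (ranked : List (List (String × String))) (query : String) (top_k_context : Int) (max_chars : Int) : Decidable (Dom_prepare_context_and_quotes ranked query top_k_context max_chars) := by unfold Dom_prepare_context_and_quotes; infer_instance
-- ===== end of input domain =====

-- B rebuilds the context as map-to-blocks / prefix-sums / cutoff-index / join instead of A's
-- accumulate-and-break loop; same return value on all inputs admitted by Pre_.

-- ===== PORT A =====
-- the f-string block f"Source: {r['source']}\n{r['text']}\n\n" (identical expression in A and B),
-- on char lists; dict lookup is first-match on the association list (Pre_ guarantees the keys exist)
def pvBlockChars (r : List (String × String)) : List Char :=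
  "Source: ".toList ++ ((List.lookup "source" r).getD "").toList ++ ['\n']
    ++ ((List.lookup "text" r).getD "").toList ++ ['\n', '\n']

-- A's for-loop: accumulate ctx, break on first block that would overflow
def pcqLoopA (m : Int) : List (List (String × String)) → List Char → List Char
  | [], ctx => ctx
  | r :: rest, ctx =>
    let block := pvBlockChars r
    if (ctx.length : Int) + (block.length : Int) > m then ctx
    else pcqLoopA m rest (ctx ++ block)

def prepare_context_and_quotes (ranked : List (List (String × String))) (query : String) (top_k_context : Int) (max_chars : Int) : String × (List (List (String × String))) :=
  let selected := PySem.List.slice ranked none (some top_k_context)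
  let ctx := pcqLoopA max_chars selected []
  (String.ofList (PySem.Chars.strip ctx), selected)

-- ===== PORT B =====
-- running prefix sums of block lengths (Python: total accumulation + sums.append)
def pcqSums : List (List Char) → Int → List Int
  | [], _ => []
  | b :: rest, t => (t + (b.length : Int)) :: pcqSums rest (t + (b.length : Int))

-- Python: next((j for j, s in enumerate(sums) if s > max_chars), len(blocks))
def pcqCut : List Int → Int → Nat
  | [], _ => 0
  | s :: rest, m => if s > m then 0 else 1 + pcqCut rest m

def prepare_context_and_quotes_alt (ranked : List (List (String × String))) (query : String) (top_k_context : Int) (max_chars : Int) : String × (List (List (String × String))) :=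
  let selected := PySem.List.slice ranked none (some top_k_context)
  let blocks := selected.map pvBlockChars
  let i := pcqCut (pcqSums blocks 0) max_chars
  (String.ofList (PySem.Chars.strip (PySem.Chars.join [] (blocks.take i))), selected)

-- ===== PRECONDITION & SPEC =====
-- Pre_ excludes inputs where some selected item lacks a 'source' or 'text' key: on almost all of
-- these A raises KeyError; on the rest (an earlier block already overflows max_chars) A returns
-- before reading the bad item while B's comprehension formats every selected item and raises.
def Pre_prepare_context_and_quotes (ranked : List (List (String × String))) (query : String) (top_k_context : Int) (max_chars : Int) : Prop :=
  ∀ r ∈ PySem.List.slice ranked none (some top_k_context),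
    (List.lookup "source" r).isSome = true ∧ (List.lookup "text" r).isSome = true
instance (ranked : List (List (String × String))) (query : String) (top_k_context : Int) (max_chars : Int) : Decidable (Pre_prepare_context_and_quotes ranked query top_k_context max_chars) := by unfold Pre_prepare_context_and_quotes; infer_instance

def pvWitness_prepare_context_and_quotes : (List (List (String × String))) × String × Int × Int :=
  ([[("source", "doc1"), ("text", "hello world")]], "q", 1, 100)

def Spec_prepare_context_and_quotes (ranked : List (List (String × String))) (query : String) (top_k_context : Int) (max_chars : Int) (out : String × (List (List (String × String)))) : Prop := out = prepare_context_and_quotes_alt ranked query top_k_context max_chars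
instance (ranked : List (List (String × String))) (query : String) (top_k_context : Int) (max_chars : Int) (out : String × (List (List (String × String)))) : Decidable (Spec_prepare_context_and_quotes ranked query top_k_context max_chars out) := by unfold Spec_prepare_context_and_quotes; infer_instance

-- ===== CLAIM (what is proved, stated in full; the proofs are below) =====
def Claim_equal_prepare_context_and_quotes : Prop := ∀ (ranked : List (List (String × String))) (query : String) (top_k_context : Int) (max_chars : Int), Dom_prepare_context_and_quotes ranked query top_k_context max_chars → Pre_prepare_context_and_quotes ranked query top_k_context max_chars → Spec_prepare_context_and_quotes ranked query top_k_context max_chars (prepare_context_and_quotes ranked query top_k_context max_chars)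

-- ===== LEMMAS AND PROOFS =====
lemma pcq_join_nil_cons (b : List Char) (l : List (List Char)) :
    PySem.Chars.join [] (b :: l) = b ++ PySem.Chars.join [] l := by
  cases l <;> simp [PySem.Chars.join, List.intercalate, List.intersperse]

lemma pcq_loop_eq (m : Int) (sel : List (List (String × String))) (ctx : List Char) :
    pcqLoopA m sel ctx
      = ctx ++ PySem.Chars.join []
          ((sel.map pvBlockChars).take
            (pcqCut (pcqSums (sel.map pvBlockChars) (ctx.length : Int)) m)) := by
  induction sel generalizing ctx with
  | nil => simp [pcqLoopA, pcqSums, pcqCut, PySem.Chars.join, List.intercalate]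
  | cons r rest ih =>
    by_cases h : (ctx.length : Int) + ((pvBlockChars r).length : Int) > m
    · simp [pcqLoopA, pcqSums, pcqCut, h, PySem.Chars.join, List.intercalate]
    · have hrec := ih (ctx ++ pvBlockChars r)
      have hl : (((ctx ++ pvBlockChars r).length : Int))
          = (ctx.length : Int) + ((pvBlockChars r).length : Int) := by simp
      rw [hl] at hrec
      simp only [pcqLoopA, if_neg h]
      rw [hrec]
      simp only [List.map_cons, pcqSums, pcqCut, if_neg h, Nat.one_add,
        List.take_succ_cons, pcq_join_nil_cons, List.append_assoc]

-- ===== VERDICT (by name: the statement is the Claim_ definition above) =====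
theorem prepare_context_and_quotes_spec : Claim_equal_prepare_context_and_quotes := by
  intro ranked query k m _ _
  show _ = _
  unfold prepare_context_and_quotes prepare_context_and_quotes_alt
  simp only []
  rw [pcq_loop_eq]
  simp
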